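-- pv_equiv track=rewrite | github.com/norahnan/Fluid-flow | Functions.py | GetSwitchTime
-- ===== SOURCE A (Python) =====
-- import copy
--
-- def SortOrder(tval,XPos):
--     numstrands = len(XPos)
--     #creats an ordered list of integers
--     OrderID = []
--     for i in range(0,numstrands):#(0,numstrands) means (0,1,...,numstrands - 1)
--         OrderID.append(i)
--     #sorted OrderID based on how Xall sorted
--     return sorted(OrderID, key=lambda k:XPos[k][tval])
--
-- def GetSwitchTime(Pos):
--     SwitchTime = []
--     a = SortOrder(0,Pos[0])
--     for t in range(1,len(Pos[0][0])):
--         b = SortOrder(t,Pos[0])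
--         if (a!=b):
--             SwitchTime.append(t-1)
--             a = copy.copy(b)   #look here first if this function does not work ... might need a deep copy of b
--     return SwitchTime
-- ===== SOURCE B (Python) =====
-- # B: instead of re-sorting at every time step, keep the previous order and do an
-- # O(n) pass checking it is still the (stable-)sorted order; re-sort only when it broke.
-- def GetSwitchTime(Pos):
--     X = Pos[0]
--     n = len(X)
--     SwitchTime = []
--     a = sorted(range(n), key=lambda k: X[k][0])
--     for t in range(1, len(X[0])):
--         # a is still sorted(range(n), key=X[.][t]) iff keys along a are
--         # non-decreasing and ties are already in increasing index order
--         ok = all(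
--             X[a[i]][t] < X[a[i + 1]][t]
--             or (X[a[i]][t] == X[a[i + 1]][t] and a[i] < a[i + 1])
--             for i in range(len(a) - 1)
--         )
--         if not ok:
--             SwitchTime.append(t - 1)
--             a = sorted(range(n), key=lambda k: X[k][t])
--     return SwitchTime
-- ===== Notes on version B (the rewrite author's own statement) =====
-- stated objective: faster
-- what changed: Instead of fully re-sorting the strand order at every time step and comparing lists, B keeps the previous order and runs an O(n) adjacent-pair scan (key non-decreasing, ties in increasing index order) that decides whether it is still the stable sort order, re-sorting only at the C steps where it actually changed.
import Mathlib
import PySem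

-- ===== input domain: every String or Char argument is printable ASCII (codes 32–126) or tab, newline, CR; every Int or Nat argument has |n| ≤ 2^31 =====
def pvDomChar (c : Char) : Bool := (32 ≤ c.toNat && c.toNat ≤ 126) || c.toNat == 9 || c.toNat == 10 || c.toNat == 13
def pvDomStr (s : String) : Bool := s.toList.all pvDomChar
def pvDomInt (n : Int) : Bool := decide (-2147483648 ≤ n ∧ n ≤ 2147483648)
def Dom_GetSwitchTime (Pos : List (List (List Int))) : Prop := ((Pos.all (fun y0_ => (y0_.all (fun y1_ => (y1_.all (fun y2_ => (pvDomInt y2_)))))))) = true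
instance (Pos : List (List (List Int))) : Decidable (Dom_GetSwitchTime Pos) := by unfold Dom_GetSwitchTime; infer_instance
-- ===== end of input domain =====

-- B replaces A's re-sort-and-compare at every time step by an O(n) "is the previous
-- order still sorted (with index tie-break)" scan, re-sorting only when it broke.

-- ===== PORT A =====
def SortOrderA (tval : Int) (XPos : List (List Int)) : List Int :=
  let numstrands : Int := PySem.List.len XPos
  let OrderID : List Int := (PySem.List.pyRange 0 numstrands 1).foldl (fun acc i => acc ++ [i]) []
  PySem.List.sorted OrderID (fun k => PySem.List.pyGetD (PySem.List.pyGetD XPos k []) tval 0) false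

def GetSwitchTime (Pos : List (List (List Int))) : List Int :=
  let a := SortOrderA 0 (PySem.List.pyGetD Pos 0 [])
  let st := (PySem.List.pyRange 1 (PySem.List.len (PySem.List.pyGetD (PySem.List.pyGetD Pos 0 []) 0 [])) 1).foldl
    (fun (st : List Int × List Int) t =>
      let b := SortOrderA t (PySem.List.pyGetD Pos 0 [])
      if st.2 ≠ b then (st.1 ++ [t - 1], b) else st)
    (([] : List Int), a)
  st.1

-- ===== PORT B =====
-- X[k][t] (the sort key used throughout Source B)
def altKey (X : List (List Int)) (t k : Int) : Int :=
  PySem.List.pyGetD (PySem.List.pyGetD X k []) t 0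

-- the all(... for i in range(len(a)-1)) scan of Source B
def altCheck (X : List (List Int)) (t : Int) (a : List Int) : Bool :=
  (PySem.List.pyRange 0 (PySem.List.len a - 1) 1).all (fun i =>
    decide (altKey X t (PySem.List.pyGetD a i 0) < altKey X t (PySem.List.pyGetD a (i + 1) 0)) ||
      (decide (altKey X t (PySem.List.pyGetD a i 0) = altKey X t (PySem.List.pyGetD a (i + 1) 0)) &&
        decide (PySem.List.pyGetD a i 0 < PySem.List.pyGetD a (i + 1) 0)))

def GetSwitchTime_alt (Pos : List (List (List Int))) : List Int :=
  let X := PySem.List.pyGetD Pos 0 []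
  let n : Int := PySem.List.len X
  let a := PySem.List.sorted (PySem.List.pyRange 0 n 1) (altKey X 0) false
  let st := (PySem.List.pyRange 1 (PySem.List.len (PySem.List.pyGetD X 0 [])) 1).foldl
    (fun (st : List Int × List Int) t =>
      if !(altCheck X t st.2) then
        (st.1 ++ [t - 1], PySem.List.sorted (PySem.List.pyRange 0 n 1) (altKey X t) false)
      else st)
    (([] : List Int), a)
  st.1

-- ===== PRECONDITION & SPEC =====
-- Exactly where Python A returns: Pos and Pos[0] non-empty, every strand non-empty
-- and at least as long as Pos[0][0] (A indexes every strand at 0..len(Pos[0][0])-1).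
def Pre_GetSwitchTime (Pos : List (List (List Int))) : Prop :=
  Pos ≠ [] ∧ Pos.headD [] ≠ [] ∧
    ∀ s ∈ Pos.headD [], s ≠ [] ∧ ((Pos.headD []).headD []).length ≤ s.length
instance (Pos : List (List (List Int))) : Decidable (Pre_GetSwitchTime Pos) := by
  unfold Pre_GetSwitchTime; infer_instance

def pvWitness_GetSwitchTime : List (List (List Int)) := [[[0, 1], [1, 0]]]

def Spec_GetSwitchTime (Pos : List (List (List Int))) (out : List Int) : Prop := out = GetSwitchTime_alt Pos
instance (Pos : List (List (List Int))) (out : List Int) : Decidable (Spec_GetSwitchTime Pos out) := by unfold Spec_GetSwitchTime; infer_instance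

-- ===== CLAIM (what is proved, stated in full; the proofs are below) =====
def Claim_equal_GetSwitchTime : Prop := ∀ (Pos : List (List (List Int))), Dom_GetSwitchTime Pos → Pre_GetSwitchTime Pos → Spec_GetSwitchTime Pos (GetSwitchTime Pos)

-- ===== LEMMAS AND PROOFS =====

-- strict and non-strict "sorted along the list" orders: key first, index tie-break
def pvLt (f : Int → Int) (x y : Int) : Prop := f x < f y ∨ (f x = f y ∧ x < y)
def pvLe (f : Int → Int) (x y : Int) : Prop := f x < f y ∨ (f x = f y ∧ x ≤ y)

theorem pvLt_trans (f : Int → Int) {x y z : Int} (h1 : pvLt f x y) (h2 : pvLt f y z) : pvLt f x z := by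
  unfold pvLt at *; rcases h1 with h1 | ⟨e1, l1⟩ <;> rcases h2 with h2 | ⟨e2, l2⟩
  · exact Or.inl (h1.trans h2)
  · exact Or.inl (e2 ▸ h1)
  · exact Or.inl (e1 ▸ h2)
  · exact Or.inr ⟨e1.trans e2, l1.trans l2⟩

-- stability of PySem's insertion sort: inserting x after all currently-equal keys
theorem insertBy_pairwise_pvLe (f : Int → Int) (x : Int) (ys : List Int)
    (h : ys.Pairwise (pvLe f)) (hx : ∀ y ∈ ys, y < x) :
    (PySem.List.insertBy (fun a b => decide (f a < f b)) x ys).Pairwise (pvLe f) := by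
  induction ys with
  | nil => simp [PySem.List.insertBy]
  | cons y ys ih =>
    have hstep : PySem.List.insertBy (fun a b => decide (f a < f b)) x (y :: ys)
        = if decide (f x < f y) then x :: y :: ys
          else y :: PySem.List.insertBy (fun a b => decide (f a < f b)) x ys := rfl
    rw [hstep]
    by_cases hxy : f x < f y
    · simp only [hxy, decide_true, if_true]
      refine List.Pairwise.cons ?_ h
      intro z hz
      rcases List.mem_cons.mp hz with hz | hz
      · rw [hz]; exact Or.inl hxy
      · have := (List.pairwise_cons.mp h).1 z hz
        rcases this with h' | ⟨e, _⟩
        · exact Or.inl (hxy.trans h')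
        · exact Or.inl (e ▸ hxy)
    · simp only [hxy, decide_false]
      refine List.Pairwise.cons ?_ (ih (List.pairwise_cons.mp h).2 (fun y' hy' => hx y' (List.mem_cons_of_mem _ hy')))
      intro z hz
      rcases (PySem.List.mem_insertBy _ _ _ _).mp hz with rfl | hz
      · -- z = x : f y ≤ f x, and if equal then y < x since y appears before x
        rcases lt_or_eq_of_le (not_lt.mp hxy) with h' | h'
        · exact Or.inl h'
        · exact Or.inr ⟨h', le_of_lt (hx y (List.mem_cons_self))⟩
      · exact (List.pairwise_cons.mp h).1 z hz

theorem foldl_insertBy_pairwise_pvLe (f : Int → Int) (xs acc : List Int)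
    (hacc : acc.Pairwise (pvLe f)) (hlt : ∀ y ∈ acc, ∀ x ∈ xs, y < x)
    (hxs : xs.Pairwise (· < ·)) :
    (xs.foldl (fun acc x => PySem.List.insertBy (fun a b => decide (f a < f b)) x acc) acc).Pairwise (pvLe f) := by
  induction xs generalizing acc with
  | nil => simpa using hacc
  | cons x xs ih =>
    simp only [List.foldl_cons]
    refine ih _ (insertBy_pairwise_pvLe f x acc hacc (fun y hy => hlt y hy x List.mem_cons_self))
      ?_ (List.pairwise_cons.mp hxs).2
    intro y hy x' hx'
    rcases (PySem.List.mem_insertBy _ _ _ _).mp hy with rfl | hy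
    · exact (List.pairwise_cons.mp hxs).1 x' hx'
    · exact hlt y hy x' (List.mem_cons_of_mem _ hx')

-- stability, stated on the sorted list
theorem sorted_pairwise_pvLe (f : Int → Int) (xs : List Int) (hxs : xs.Pairwise (· < ·)) :
    (PySem.List.sorted xs f false).Pairwise (pvLe f) := by
  rw [PySem.List.sorted_eq_foldl_insertBy]
  exact foldl_insertBy_pairwise_pvLe f xs [] (by simp) (by simp) hxs

-- uniqueness: any pvLe-pairwise rearrangement of xs IS the stable sort of xs
theorem sorted_eq_of_pairwise_pvLe (f : Int → Int) (xs a : List Int)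
    (hxs : xs.Pairwise (· < ·)) (hp : a.Perm xs) (ha : a.Pairwise (pvLe f)) :
    PySem.List.sorted xs f false = a := by
  refine PySem.List.eq_of_perm_of_pairwise_le_of_injective
    (key := fun i => toLex ((f i, i) : Int × Int)) ?_ ?_ ?_ ?_
  · intro i j hij
    have : ((f i, i) : Int × Int) = (f j, j) := toLex.injective hij
    exact (Prod.mk.injEq _ _ _ _).mp this |>.2
  · exact (PySem.List.sorted_perm xs f false).trans hp.symm
  · refine (sorted_pairwise_pvLe f xs hxs).imp ?_
    intro x y h
    rw [Prod.Lex.le_iff]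
    exact h
  · refine ha.imp ?_
    intro x y h
    rw [Prod.Lex.le_iff]
    exact h

theorem pairwise_pvLt_of_pvLe (f : Int → Int) (a : List Int)
    (hn : a.Nodup) (h : a.Pairwise (pvLe f)) : a.Pairwise (pvLt f) := by
  refine (h.and hn).imp ?_
  rintro x y ⟨hle, hne⟩
  rcases hle with h' | ⟨e, l⟩
  · exact Or.inl h'
  · exact Or.inr ⟨e, lt_of_le_of_ne l hne⟩

-- Source B's index scan decides exactly Pairwise (pvLt (altKey X t)) on a
theorem altCheck_iff_pairwise (X : List (List Int)) (t : Int) (a : List Int) :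
    altCheck X t a = true ↔ a.Pairwise (pvLt (altKey X t)) := by
  unfold altCheck
  rw [List.all_eq_true]
  have hidx : (∀ x ∈ PySem.List.pyRange 0 (PySem.List.len a - 1) 1,
        (decide (altKey X t (PySem.List.pyGetD a x 0) < altKey X t (PySem.List.pyGetD a (x + 1) 0)) ||
          (decide (altKey X t (PySem.List.pyGetD a x 0) = altKey X t (PySem.List.pyGetD a (x + 1) 0)) &&
            decide (PySem.List.pyGetD a x 0 < PySem.List.pyGetD a (x + 1) 0))) = true)
      ↔ ∀ (i : Nat) (_hi : i + 1 < a.length), pvLt (altKey X t) a[i] a[i + 1] := by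
    constructor
    · intro h i hi
      have hmem : (i : Int) ∈ PySem.List.pyRange 0 (PySem.List.len a - 1) 1 := by
        rw [PySem.List.mem_pyRange_one]
        constructor
        · exact_mod_cast Int.natCast_nonneg i
        · simp only [PySem.List.len_eq]; omega
      have := h (i : Int) hmem
      rw [PySem.List.pyGetD_eq_getElem a 0 (by positivity) (by exact_mod_cast Nat.lt_of_succ_lt hi),
          PySem.List.pyGetD_eq_getElem a 0 (by positivity) (by omega)] at this
      simp only [Bool.or_eq_true, Bool.and_eq_true, decide_eq_true_eq] at this
      have e1 : ((i : Int)).toNat = i := by simp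
      have e2 : ((i : Int) + 1).toNat = i + 1 := by omega
      simp only [e1, e2] at this
      exact this
    · intro h x hx
      rw [PySem.List.mem_pyRange_one] at hx
      simp only [PySem.List.len_eq] at hx
      obtain ⟨hx0, hx1⟩ := hx
      have hi : x.toNat + 1 < a.length := by omega
      have := h x.toNat hi
      rw [PySem.List.pyGetD_eq_getElem a 0 hx0 (by omega),
          PySem.List.pyGetD_eq_getElem a 0 (by omega) (by omega)]
      simp only [Bool.or_eq_true, Bool.and_eq_true, decide_eq_true_eq]
      have e2 : (x + 1).toNat = x.toNat + 1 := by omega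
      simp only [e2]
      exact this
  rw [hidx, ← List.isChain_iff_getElem]
  haveI : Trans (pvLt (altKey X t)) (pvLt (altKey X t)) (pvLt (altKey X t)) :=
    ⟨fun h1 h2 => pvLt_trans _ h1 h2⟩
  exact List.isChain_iff_pairwise

-- the check succeeds on a  ↔  a is already the stable sort order at time t
theorem altCheck_iff_sorted_eq (X : List (List Int)) (t m : Int) (a : List Int)
    (hp : a.Perm (PySem.List.pyRange 0 m 1)) :
    altCheck X t a = true ↔ PySem.List.sorted (PySem.List.pyRange 0 m 1) (altKey X t) false = a := by
  constructor
  · intro h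
    refine sorted_eq_of_pairwise_pvLe _ _ _ (PySem.List.pairwise_lt_pyRange_one 0 m) hp ?_
    refine ((altCheck_iff_pairwise X t a).mp h).imp ?_
    rintro x y (h' | ⟨e, l⟩)
    · exact Or.inl h'
    · exact Or.inr ⟨e, le_of_lt l⟩
  · intro h
    rw [altCheck_iff_pairwise]
    have hn : a.Nodup := hp.nodup_iff.mpr (PySem.List.nodup_pyRange_one 0 m)
    have := sorted_pairwise_pvLe (altKey X t) _ (PySem.List.pairwise_lt_pyRange_one 0 m)
    rw [h] at this
    exact pairwise_pvLt_of_pvLe _ _ hn this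

-- A's SortOrder is exactly the sort B performs
theorem sortOrderA_eq (t : Int) (X : List (List Int)) :
    SortOrderA t X = PySem.List.sorted (PySem.List.pyRange 0 (PySem.List.len X) 1) (altKey X t) false := by
  simp only [SortOrderA, PySem.List.foldl_append_singleton, List.nil_append]
  rfl

-- the two loops run in lockstep as long as the carried order is a permutation of range(n)
theorem loop_eq (X : List (List Int)) (ts : List Int) (acc a : List Int)
    (hp : a.Perm (PySem.List.pyRange 0 (PySem.List.len X) 1)) :
    ts.foldl (fun (st : List Int × List Int) t =>
        if st.2 ≠ PySem.List.sorted (PySem.List.pyRange 0 (PySem.List.len X) 1) (altKey X t) false then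
          (st.1 ++ [t - 1], PySem.List.sorted (PySem.List.pyRange 0 (PySem.List.len X) 1) (altKey X t) false)
        else st) (acc, a)
      = ts.foldl (fun (st : List Int × List Int) t =>
          if !(altCheck X t st.2) then
            (st.1 ++ [t - 1], PySem.List.sorted (PySem.List.pyRange 0 (PySem.List.len X) 1) (altKey X t) false)
          else st) (acc, a) := by
  induction ts generalizing acc a with
  | nil => rfl
  | cons t ts ih =>
    simp only [List.foldl_cons]
    by_cases hc : altCheck X t a = true
    · have hb : PySem.List.sorted (PySem.List.pyRange 0 (PySem.List.len X) 1) (altKey X t) false = a :=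
        (altCheck_iff_sorted_eq X t _ a hp).mp hc
      rw [if_neg (by rw [hb]; simp), if_neg (by simp [hc])]
      exact ih acc a hp
    · have hb : a ≠ PySem.List.sorted (PySem.List.pyRange 0 (PySem.List.len X) 1) (altKey X t) false := by
        intro h
        exact hc ((altCheck_iff_sorted_eq X t _ a hp).mpr h.symm)
      rw [if_pos hb, if_pos (by simp [hc])]
      exact ih _ _ (PySem.List.sorted_perm _ _ _)

-- ===== VERDICT (by name: the statement is the Claim_ definition above) =====
theorem GetSwitchTime_spec : Claim_equal_GetSwitchTime := by
  intro Pos _ _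
  show GetSwitchTime Pos = GetSwitchTime_alt Pos
  simp only [GetSwitchTime, GetSwitchTime_alt, sortOrderA_eq]
  congr 1
  exact loop_eq (PySem.List.pyGetD Pos 0 []) _ [] _ (PySem.List.sorted_perm _ _ _)
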